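-- pv_equiv track=rewrite | github.com/pbasista/mypy | mypy/stubutil.py | find_unique_signatures
-- ===== SOURCE A (Python) =====
-- from typing import Optional, Tuple, Sequence, MutableSequence, List, MutableMapping, IO
--
-- Sig = Tuple[str, str]
--
-- def find_unique_signatures(sigs: Sequence[Sig]) -> List[Sig]:
--     sig_map = {}  # type: MutableMapping[str, List[str]]
--     for name, sig in sigs:
--         sig_map.setdefault(name, []).append(sig)
--     result = []
--     for name, name_sigs in sig_map.items():
--         if len(set(name_sigs)) == 1:
--             result.append((name, name_sigs[0]))
--     return sorted(result)
-- ===== SOURCE B (Python) =====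
-- def find_unique_signatures(sigs):
--     first = {}
--     conflicting = set()
--     for name, sig in sigs:
--         if name not in first:
--             first[name] = sig
--         elif first[name] != sig:
--             conflicting.add(name)
--     return sorted((name, sig) for name, sig in first.items() if name not in conflicting)
-- ===== Notes on version B (the rewrite author's own statement) =====
-- stated objective: alternative
-- what changed: Instead of grouping every signature into a per-name list dict and deduplicating each group afterwards, B does a single pass keeping only the first-seen signature per name plus a set of names seen with a differing signature, then emits the non-conflicting names sorted.
import Mathlib
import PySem

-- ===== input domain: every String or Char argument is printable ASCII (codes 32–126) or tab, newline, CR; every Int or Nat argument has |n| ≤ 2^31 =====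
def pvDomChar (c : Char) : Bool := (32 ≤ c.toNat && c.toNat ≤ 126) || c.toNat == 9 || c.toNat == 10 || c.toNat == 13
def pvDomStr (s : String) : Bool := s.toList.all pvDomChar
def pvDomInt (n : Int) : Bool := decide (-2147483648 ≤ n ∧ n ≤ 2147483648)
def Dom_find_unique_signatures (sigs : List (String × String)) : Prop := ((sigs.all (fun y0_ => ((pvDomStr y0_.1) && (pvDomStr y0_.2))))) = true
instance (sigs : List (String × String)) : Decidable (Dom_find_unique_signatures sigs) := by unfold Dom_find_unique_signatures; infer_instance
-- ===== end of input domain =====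

-- B replaces A's group-all-signatures-per-name dict (lists deduplicated afterwards) by on-the-fly
-- conflict tracking: a first-seen-signature dict plus a set of names seen with a differing signature.

-- ===== PORT A =====
-- sig_map.setdefault(name, []).append(sig)  ==  sig_map[name] = sig_map.get(name, []) + [sig]
def find_unique_signatures (sigs : List (String × String)) : List (String × String) :=
  let sig_map : PySem.Dict String (List String) :=
    sigs.foldl (fun d p => d.modify p.1 [] (fun x => x ++ [p.2])) PySem.Dict.empty
  let result : List (String × String) :=
    sig_map.items.foldl (fun r p =>
      if PySem.Set.len (PySem.Set.ofList p.2) == 1 then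
        -- name_sigs[0]: the group is nonempty by construction, so Python's [0] is the head
        r ++ [(p.1, p.2.headD "")]
      else r) []
  PySem.List.sorted2 result (fun q => q.1) (fun q => q.2)

-- ===== PORT B =====
-- one step of B's loop: record a first-seen signature, or flag the name as conflicting
def fusStep (st : PySem.Dict String String × PySem.Set String) (p : String × String) :
    PySem.Dict String String × PySem.Set String :=
  if st.1.contains p.1 = false then (st.1.insert p.1 p.2, st.2)
  else if st.1.getD p.1 "" ≠ p.2 then (st.1, PySem.Set.add st.2 p.1)
  else st

def find_unique_signatures_alt (sigs : List (String × String)) : List (String × String) :=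
  let st := sigs.foldl fusStep (PySem.Dict.empty, PySem.Set.empty)
  PySem.List.sorted2 (st.1.items.filter (fun p => !(st.2.contains p.1)))
    (fun q => q.1) (fun q => q.2)

-- ===== PRECONDITION & SPEC =====
def Spec_find_unique_signatures (sigs : List (String × String)) (out : List (String × String)) : Prop := out = find_unique_signatures_alt sigs
instance (sigs : List (String × String)) (out : List (String × String)) : Decidable (Spec_find_unique_signatures sigs out) := by unfold Spec_find_unique_signatures; infer_instance

-- ===== CLAIM (what is proved, stated in full; the proofs are below) =====
def Claim_equal_find_unique_signatures : Prop := ∀ (sigs : List (String × String)), Dom_find_unique_signatures sigs → Spec_find_unique_signatures sigs (find_unique_signatures sigs)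

-- ===== LEMMAS AND PROOFS =====

-- the multiset of signatures recorded for a name (A's sig_map value, in order)
def fusGroup (sigs : List (String × String)) (k : String) : List String :=
  (sigs.filter (fun p => p.1 == k)).map (fun p => p.2)

def fusFold (sigs : List (String × String)) : PySem.Dict String String × PySem.Set String :=
  sigs.foldl fusStep (PySem.Dict.empty, PySem.Set.empty)

theorem fusGroup_append (sigs : List (String × String)) (p : String × String) (k : String) :
    fusGroup (sigs ++ [p]) k = fusGroup sigs k ++ (if p.1 = k then [p.2] else []) := by
  simp [fusGroup, List.filter_append]
  split_ifs with h <;> simp [h]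

theorem fusGroup_eq_nil_iff (sigs : List (String × String)) (k : String) :
    fusGroup sigs k = [] ↔ k ∉ sigs.map (fun p => p.1) := by
  rw [fusGroup]
  constructor
  · intro h hk
    obtain ⟨p, hp, hpk⟩ := List.mem_map.1 hk
    have hmem : p ∈ List.filter (fun p => p.1 == k) sigs :=
      List.mem_filter.2 ⟨hp, by simp [hpk]⟩
    have hf : List.filter (fun p => p.1 == k) sigs = [] := by simpa using h
    rw [hf] at hmem
    simp at hmem
  · intro h
    have : List.filter (fun p => p.1 == k) sigs = [] := by
      rw [List.filter_eq_nil_iff]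
      intro p hp
      simp only [beq_iff_eq]
      intro hpk
      exact h (List.mem_map.2 ⟨p, hp, hpk⟩)
    simp [this]

theorem fusFold_keys (sigs : List (String × String)) :
    (fusFold sigs).1.keys = PySem.Set.ofList (sigs.map (fun p => p.1)) := by
  induction sigs using List.reverseRecOn with
  | nil => rfl
  | append_singleton sigs p ih =>
    have hfold : fusFold (sigs ++ [p]) = fusStep (fusFold sigs) p := by
      simp [fusFold, List.foldl_append]
    rw [hfold]
    simp only [List.map_append, List.map_cons, List.map_nil,
      PySem.Set.ofList_append_singleton]
    unfold fusStep
    split_ifs with h1 h2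
    · rw [PySem.Dict.keys_insert_of_not_contains _ _ h1, ih,
        PySem.Set.add_of_not_mem]
      rw [← ih]; intro hmem
      rw [← PySem.Dict.contains_iff_mem_keys] at hmem
      simp [h1] at hmem
    · simp only [ih]
      rw [PySem.Set.add_of_mem]
      rw [← ih, ← PySem.Dict.contains_iff_mem_keys]
      simpa using h1
    · simp only [ih]
      rw [PySem.Set.add_of_mem]
      rw [← ih, ← PySem.Dict.contains_iff_mem_keys]
      simpa using h1

theorem fusFold_nodup (sigs : List (String × String)) : (fusFold sigs).1.keys.Nodup := by
  rw [fusFold_keys]; exact PySem.Set.nodup_ofList _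

theorem fusFold_contains (sigs : List (String × String)) (k : String) :
    (fusFold sigs).1.contains k = true ↔ ¬ fusGroup sigs k = [] := by
  rw [PySem.Dict.contains_iff_mem_keys, fusFold_keys, PySem.Set.mem_ofList,
    fusGroup_eq_nil_iff]
  simp

theorem fusFold_getD (sigs : List (String × String)) (k : String) :
    (fusFold sigs).1.getD k "" = (fusGroup sigs k).headD "" := by
  induction sigs using List.reverseRecOn with
  | nil => rfl
  | append_singleton sigs p ih =>
    have hfold : fusFold (sigs ++ [p]) = fusStep (fusFold sigs) p := by
      simp [fusFold, List.foldl_append]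
    rw [hfold, fusGroup_append]
    by_cases hk : p.1 = k
    · rw [if_pos hk]
      unfold fusStep
      split_ifs with h1 h2
      · -- name unseen: its group so far is empty
        have hg : fusGroup sigs p.1 = [] := by
          by_contra hne; rw [← fusFold_contains] at hne; simp [h1] at hne
        rw [PySem.Dict.getD_insert]
        rw [← hk, hg]
        simp
      · -- name seen with a different signature: dict unchanged, head unchanged
        have hne : ¬ fusGroup sigs p.1 = [] := by
          rw [← fusFold_contains]; simpa using h1
        obtain ⟨a, t, hg⟩ := List.exists_cons_of_ne_nil (by rw [hk] at hne; exact hne)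
        simp only [ih, hg]
        simp
      · have hne : ¬ fusGroup sigs p.1 = [] := by
          rw [← fusFold_contains]; simpa using h1
        obtain ⟨a, t, hg⟩ := List.exists_cons_of_ne_nil (by rw [hk] at hne; exact hne)
        simp only [ih, hg]
        simp
    · rw [if_neg hk, List.append_nil]
      unfold fusStep
      split_ifs with h1 h2
      · rw [PySem.Dict.getD_insert, if_neg (fun h => hk h.symm), ih]
      · exact ih
      · exact ih

theorem fusFold_conf (sigs : List (String × String)) (k : String) :
    k ∈ (fusFold sigs).2 ↔ ∃ s ∈ fusGroup sigs k, s ≠ (fusGroup sigs k).headD "" := by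
  induction sigs using List.reverseRecOn with
  | nil => simp [fusFold, fusGroup, PySem.Set.empty]
  | append_singleton sigs p ih =>
    have hfold : fusFold (sigs ++ [p]) = fusStep (fusFold sigs) p := by
      simp [fusFold, List.foldl_append]
    rw [hfold, fusGroup_append]
    by_cases hk : p.1 = k
    · rw [if_pos hk]
      unfold fusStep
      split_ifs with h1 h2
      · -- first occurrence of the name: group so far is empty, set unchanged
        have hg : fusGroup sigs k = [] := by
          by_contra hne; rw [← hk, ← fusFold_contains] at hne; simp [h1] at hne
        simp only [List.nil_append, ih, hg]
        simp
      · -- conflicting signature: k is added to the set, and the witness is p.2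
        have hne : ¬ fusGroup sigs k = [] := by
          rw [← hk, ← fusFold_contains]; simpa using h1
        obtain ⟨a, t, hg⟩ := List.exists_cons_of_ne_nil hne
        rw [fusFold_getD, hk, hg] at h2
        simp only [hg, List.cons_append, List.headD_cons, PySem.Set.mem_add]
        simp only [List.headD_cons] at h2
        constructor
        · intro _
          exact ⟨p.2, by simp, fun hh => h2 hh.symm⟩
        · intro _; right; exact hk.symm
      · -- repeated identical signature: head unchanged, set unchanged
        have hne : ¬ fusGroup sigs k = [] := by
          rw [← hk, ← fusFold_contains]; simpa using h1
        obtain ⟨a, t, hg⟩ := List.exists_cons_of_ne_nil hne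
        rw [fusFold_getD, hk, hg] at h2
        simp only [ne_eq, not_not, List.headD_cons] at h2
        rw [ih, hg]
        simp only [List.cons_append, List.headD_cons]
        constructor
        · rintro ⟨s, hs, hsa⟩
          exact ⟨s, by simp only [List.mem_cons, List.mem_append] at hs ⊢; tauto, hsa⟩
        · rintro ⟨s, hs, hsa⟩
          rcases List.mem_cons.1 hs with rfl | hs
          · exact absurd rfl hsa
          · rcases List.mem_append.1 hs with hs | hs
            · exact ⟨s, by simp [hs], hsa⟩
            · have hsp : s = p.2 := by simpa using hs
              subst hsp
              exact absurd h2.symm hsa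
    · rw [if_neg hk, List.append_nil]
      have hmem : k ∈ (fusStep (fusFold sigs) p).2 ↔ k ∈ (fusFold sigs).2 := by
        unfold fusStep
        have hne : ¬ k = p.1 := fun h => hk h.symm
        split_ifs <;> simp [PySem.Set.mem_add, hne]
      rw [hmem, ih]

-- len(set(g)) == 1  ⟺  every element of the nonempty group equals its head
theorem setLen_one_iff (a : String) (t : List String) :
    (PySem.Set.len (PySem.Set.ofList (a :: t)) == 1) = true ↔ ∀ x ∈ t, x = a := by
  rw [PySem.Set.ofList_cons]
  have : PySem.Set.len (a :: (PySem.Set.ofList t).discard a) =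
      ((PySem.Set.ofList t).discard a).length + 1 := by
    simp [PySem.Set.len]
  rw [beq_iff_eq, this]
  constructor
  · intro h x hx
    have hnil : ((PySem.Set.ofList t).discard a).length = 0 := by omega
    rw [List.length_eq_zero_iff] at hnil
    by_contra hxa
    have : x ∈ (PySem.Set.ofList t).discard a := by
      rw [PySem.Set.mem_discard]; exact ⟨(PySem.Set.mem_ofList _ _).2 hx, hxa⟩
    simp [hnil] at this
  · intro h
    have hnil : (PySem.Set.ofList t).discard a = [] := by
      rw [List.eq_nil_iff_forall_not_mem]
      intro x hx
      rw [PySem.Set.mem_discard, PySem.Set.mem_ofList] at hx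
      exact hx.2 (h x hx.1)
    simp [hnil]

theorem fus_unsorted_eq (sigs : List (String × String)) :
    ((sigs.foldl (fun d p => d.modify p.1 [] (fun x => x ++ [p.2]))
        PySem.Dict.empty).items.foldl (fun r p =>
        if PySem.Set.len (PySem.Set.ofList p.2) == 1 then r ++ [(p.1, p.2.headD "")] else r) [])
    = ((fusFold sigs).1.items.filter (fun p => !((fusFold sigs).2.contains p.1))) := by
  set sig_map : PySem.Dict String (List String) :=
    sigs.foldl (fun d p => d.modify p.1 [] (fun x => x ++ [p.2])) PySem.Dict.empty with hmap
  set names := PySem.Set.ofList (sigs.map (fun p => p.1)) with hnames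
  -- A's dict: keys, values
  have hAkeys : sig_map.keys = names := by
    rw [hmap]
    have := PySem.Dict.keys_foldl_modify_key sigs (fun p => p.1) ([] : List String)
      (fun _ p => fun x => x ++ [p.2]) PySem.Dict.empty
    simpa [PySem.Set.update_nil_left] using this
  have hAnodup : sig_map.keys.Nodup := by rw [hAkeys]; exact PySem.Set.nodup_ofList _
  have hAgetD : ∀ k, sig_map.getD k [] = fusGroup sigs k := by
    intro k
    rw [hmap]
    simpa [fusGroup] using PySem.Dict.getD_foldl_modify_append sigs PySem.Dict.empty k
  have hAitems : sig_map.items = names.map (fun k => (k, fusGroup sigs k)) := by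
    rw [PySem.Dict.items_eq_map_keys sig_map hAnodup [], hAkeys]
    exact List.map_congr_left (fun k _ => by rw [hAgetD])
  -- B's dict items
  have hBitems : (fusFold sigs).1.items = names.map (fun k => (k, (fusGroup sigs k).headD "")) := by
    rw [PySem.Dict.items_eq_map_keys _ (fusFold_nodup sigs) "", fusFold_keys]
    exact List.map_congr_left (fun k _ => by rw [fusFold_getD])
  rw [hAitems, hBitems]
  rw [PySem.List.foldl_append_if, List.filter_map, List.filter_map]
  simp only [List.nil_append]
  have hfilter : List.filter ((fun p => PySem.Set.len (PySem.Set.ofList p.2) == 1) ∘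
        (fun k => (k, fusGroup sigs k))) names
      = List.filter ((fun p => !((fusFold sigs).2.contains p.1)) ∘
        (fun k => (k, (fusGroup sigs k).headD ""))) names := by
    apply List.filter_congr
    intro k hk
    have hne : fusGroup sigs k ≠ [] := by
      rw [Ne, fusGroup_eq_nil_iff]
      simpa [hnames, PySem.Set.mem_ofList] using hk
    obtain ⟨a, t, hg⟩ := List.exists_cons_of_ne_nil hne
    simp only [Function.comp]
    rw [hg]
    have hconf : (fusFold sigs).2.contains k = true ↔
        ∃ s ∈ fusGroup sigs k, s ≠ (fusGroup sigs k).headD "" := by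
      rw [PySem.Set.contains_iff]; exact fusFold_conf sigs k
    rw [hg] at hconf
    by_cases hall : ∀ x ∈ t, x = a
    · have h1 : (PySem.Set.len (PySem.Set.ofList (a :: t)) == 1) = true :=
        (setLen_one_iff a t).2 hall
      have h2 : (fusFold sigs).2.contains k = false := by
        rw [← Bool.not_eq_true, hconf]
        rintro ⟨s, hs, hsa⟩
        simp only [List.headD_cons] at hsa
        rcases List.mem_cons.1 hs with rfl | hs
        · exact hsa rfl
        · exact hsa (hall s hs)
      rw [h1, h2]; rfl
    · have h1 : (PySem.Set.len (PySem.Set.ofList (a :: t)) == 1) = false := by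
        rw [← Bool.not_eq_true, setLen_one_iff]; exact hall
      rw [not_forall] at hall
      obtain ⟨x, hx⟩ := hall
      rw [Classical.not_imp] at hx
      obtain ⟨hx, hxa⟩ := hx
      have h2 : (fusFold sigs).2.contains k = true :=
        hconf.2 ⟨x, by simp [hx], by simpa using hxa⟩
      rw [h1, h2]; rfl
  rw [hfilter, List.map_map]
  rfl

-- ===== VERDICT (by name: the statement is the Claim_ definition above) =====
theorem find_unique_signatures_spec : Claim_equal_find_unique_signatures := by
  intro sigs _
  unfold Spec_find_unique_signatures find_unique_signatures find_unique_signatures_alt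
  have h := fus_unsorted_eq sigs
  simp only at h ⊢
  rw [h]
  rfl
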